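-- pv_equiv track=rewrite | github.com/linalinalina1/aa_labs | Lab_2/visualisation.py | heapsort_basic_states
-- ===== SOURCE A (Python) =====
-- from typing import Generator, List, Sequence, Tuple, Optional, Dict, Any
--
-- Frame = Tuple[List[int], List[bool]]  # (array_state, is_sorted_mask)
--
-- def heapsort_basic_states(arr: Sequence[int]) -> Generator[Frame, None, None]:
--     a = list(arr)
--     n = len(a)
--     fixed = [False] * n
--     yield a[:], fixed[:]
--
--     def sift_down_recursive(root: int, heap_size: int) -> Generator[Frame, None, None]:
--         left = 2 * root + 1
--         right = left + 1
--         largest = root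
--
--         if left < heap_size and a[left] > a[largest]:
--             largest = left
--         if right < heap_size and a[right] > a[largest]:
--             largest = right
--
--         if largest != root:
--             a[root], a[largest] = a[largest], a[root]
--             yield a[:], fixed[:]
--             yield from sift_down_recursive(largest, heap_size)
--
--     for i in range(n // 2 - 1, -1, -1):
--         yield from sift_down_recursive(i, n)
--
--     for end in range(n - 1, 0, -1):
--         a[0], a[end] = a[end], a[0]
--         yield a[:], fixed[:]
--         fixed[end] = True
--         yield a[:], fixed[:]
--         yield from sift_down_recursive(0, end)
--
--     if n:
--         fixed[0] = True
--     yield a[:], fixed[:]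
-- ===== SOURCE B (Python) =====
-- from typing import Generator, List, Sequence, Tuple
--
-- Frame = Tuple[List[int], List[bool]]
--
-- def heapsort_basic_states(arr: Sequence[int]) -> Generator[Frame, None, None]:
--     a = list(arr)
--     n = len(a)
--     fixed = [False] * n
--     frames: List[Frame] = [(a[:], fixed[:])]
--
--     def sift(root: int, size: int) -> None:
--         # iterative sift-down driven by the larger child; one comparison chain per level
--         while True:
--             child = 2 * root + 1
--             if child >= size:
--                 return
--             if child + 1 < size and a[child + 1] > a[child]:
--                 child += 1
--             if a[child] <= a[root]:
--                 return
--             a[root], a[child] = a[child], a[root]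
--             frames.append((a[:], fixed[:]))
--             root = child
--
--     def build(k: int) -> None:
--         # countdown recursion replacing A's for-loop over range(n//2-1,-1,-1)
--         if k == 0:
--             return
--         sift(k - 1, n)
--         build(k - 1)
--
--     def extract(e: int) -> None:
--         # countdown recursion replacing A's for-loop over range(n-1,0,-1)
--         if e <= 0:
--             return
--         a[0], a[e] = a[e], a[0]
--         frames.append((a[:], fixed[:]))
--         fixed[e] = True
--         frames.append((a[:], fixed[:]))
--         sift(0, e)
--         extract(e - 1)
--
--     build(n // 2)
--     extract(n - 1)
--     if n:
--         fixed[0] = True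
--     frames.append((a[:], fixed[:]))
--     yield from frames
-- ===== Notes on version B (the rewrite author's own statement) =====
-- stated objective: alternative
-- what changed: The recursive frame-yielding sift_down (largest computed by two successive root-comparisons) is replaced by an iterative sift that first selects the larger in-bounds child and then compares it once against the root, the two for-loops become countdown recursions, and frames are accumulated forward into one list instead of being yielded along the recursion.
import Mathlib
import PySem

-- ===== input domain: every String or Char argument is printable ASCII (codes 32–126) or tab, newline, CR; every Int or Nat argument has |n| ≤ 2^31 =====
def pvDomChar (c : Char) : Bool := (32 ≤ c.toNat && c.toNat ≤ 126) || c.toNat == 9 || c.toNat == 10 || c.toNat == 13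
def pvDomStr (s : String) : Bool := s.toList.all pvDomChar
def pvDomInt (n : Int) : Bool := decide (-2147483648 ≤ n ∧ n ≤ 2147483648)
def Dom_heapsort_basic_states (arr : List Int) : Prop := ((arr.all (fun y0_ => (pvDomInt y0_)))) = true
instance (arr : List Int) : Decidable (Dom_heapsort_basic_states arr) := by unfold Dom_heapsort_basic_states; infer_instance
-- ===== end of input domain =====

-- B restructures A: the recursive yield-as-you-go sift_down becomes an iterative larger-child
-- sift with a single comparison chain, the two for-loops become countdown recursions, and the
-- frames are collected forward into one list; same frame sequence, alternative decomposition.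

-- ===== PORT A =====
-- A's `largest` computation (the two successive if-statements of sift_down_recursive).
def pvChooseA (a : List Int) (root heapSize : Nat) : Nat :=
  let left := 2 * root + 1
  let right := left + 1
  let l1 := if left < heapSize ∧ a.getD left 0 > a.getD root 0 then left else root
  if right < heapSize ∧ a.getD right 0 > a.getD l1 0 then right else l1

lemma pvChooseA_bounds (a : List Int) (root heapSize : Nat)
    (h : pvChooseA a root heapSize ≠ root) :
    root < pvChooseA a root heapSize ∧ pvChooseA a root heapSize < heapSize := by
  unfold pvChooseA at *
  dsimp only at *
  split_ifs at * <;> omega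

-- A's sift_down_recursive: returns the updated array and the yielded frames in order.
def siftA (a : List Int) (fixed : List Bool) (root heapSize : Nat) :
    List Int × List (List Int × List Bool) :=
  let largest := pvChooseA a root heapSize
  if h : largest ≠ root then
    let a' := (a.set root (a.getD largest 0)).set largest (a.getD root 0)
    let r := siftA a' fixed largest heapSize
    (r.1, (a', fixed) :: r.2)
  else
    (a, [])
termination_by heapSize - root
decreasing_by
  have := pvChooseA_bounds a root heapSize h
  omega

-- body of A's build-heap loop
def stepBuildA (fixed0 : List Bool) (n : Nat)
    (st : List Int × List (List Int × List Bool)) (i : Nat) :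
    List Int × List (List Int × List Bool) :=
  let r := siftA st.1 fixed0 i n
  (r.1, st.2 ++ r.2)

-- body of A's extract loop (state: a, fixed, frames so far)
def stepExtractA (st : List Int × List Bool × List (List Int × List Bool)) (e : Nat) :
    List Int × List Bool × List (List Int × List Bool) :=
  let a1 := (st.1.set 0 (st.1.getD e 0)).set e (st.1.getD 0 0)
  let fixed1 := st.2.1.set e true
  let r := siftA a1 fixed1 0 e
  (r.1, fixed1, st.2.2 ++ [(a1, st.2.1), (a1, fixed1)] ++ r.2)

def heapsort_basic_states (arr : List Int) : List (List Int × List Bool) :=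
  let n := arr.length
  let fixed0 := List.replicate n false
  let s1 := ((List.range (n / 2)).reverse).foldl (stepBuildA fixed0 n) (arr, [(arr, fixed0)])
  let s2 := ((List.range' 1 (n - 1)).reverse).foldl stepExtractA (s1.1, fixed0, s1.2)
  let fixedF := if n ≠ 0 then s2.2.1.set 0 true else s2.2.1
  s2.2.2 ++ [(s2.1, fixedF)]

-- ===== PORT B =====
-- B's iterative sift: pick the larger in-bounds child, stop if it does not beat the root,
-- otherwise swap, record the frame, and continue from that child.
def siftB (a : List Int) (fixed : List Bool) (root size : Nat)
    (acc : List (List Int × List Bool)) : List Int × List (List Int × List Bool) :=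
  let child := 2 * root + 1
  if hc : child < size then
    let c := if child + 1 < size ∧ a.getD (child + 1) 0 > a.getD child 0 then child + 1 else child
    if a.getD c 0 ≤ a.getD root 0 then (a, acc)
    else
      let a' := (a.set root (a.getD c 0)).set c (a.getD root 0)
      siftB a' fixed c size (acc ++ [(a', fixed)])
  else (a, acc)
termination_by size - root
decreasing_by
  simp only [c, child] at *
  split <;> omega

-- countdown recursion replacing A's build-heap for-loop
def buildB (n : Nat) (fixed : List Bool) (k : Nat) (a : List Int)
    (acc : List (List Int × List Bool)) : List Int × List (List Int × List Bool) :=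
  match k with
  | 0 => (a, acc)
  | Nat.succ k' =>
    let r := siftB a fixed k' n acc
    buildB n fixed k' r.1 r.2

-- countdown recursion replacing A's extract for-loop
def extractB (e : Nat) (a : List Int) (fixed : List Bool)
    (acc : List (List Int × List Bool)) : List Int × List Bool × List (List Int × List Bool) :=
  match e with
  | 0 => (a, fixed, acc)
  | Nat.succ e' =>
    let a1 := (a.set 0 (a.getD (e' + 1) 0)).set (e' + 1) (a.getD 0 0)
    let fixed1 := fixed.set (e' + 1) true
    let r := siftB a1 fixed1 0 (e' + 1) (acc ++ [(a1, fixed), (a1, fixed1)])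
    extractB e' r.1 fixed1 r.2

def heapsort_basic_states_alt (arr : List Int) : List (List Int × List Bool) :=
  let n := arr.length
  let fixed0 := List.replicate n false
  let s1 := buildB n fixed0 (n / 2) arr [(arr, fixed0)]
  let s2 := extractB (n - 1) s1.1 fixed0 s1.2
  let fixedF := if n ≠ 0 then s2.2.1.set 0 true else s2.2.1
  s2.2.2 ++ [(s2.1, fixedF)]

-- ===== PRECONDITION & SPEC =====
def Spec_heapsort_basic_states (arr : List Int) (out : List (List Int × List Bool)) : Prop := out = heapsort_basic_states_alt arr
instance (arr : List Int) (out : List (List Int × List Bool)) : Decidable (Spec_heapsort_basic_states arr out) := by unfold Spec_heapsort_basic_states; infer_instance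

-- ===== CLAIM (what is proved, stated in full; the proofs are below) =====
def Claim_equal_heapsort_basic_states : Prop := ∀ (arr : List Int), Dom_heapsort_basic_states arr → Spec_heapsort_basic_states arr (heapsort_basic_states arr)

-- ===== LEMMAS AND PROOFS =====
-- A's two-step `largest` choice coincides with B's larger-child-then-compare choice.
lemma chooseA_char (a : List Int) (root size : Nat) :
    pvChooseA a root size =
      if 2 * root + 1 < size then
        (let c := if 2 * root + 1 + 1 < size ∧ a.getD (2 * root + 1 + 1) 0 > a.getD (2 * root + 1) 0
                  then 2 * root + 1 + 1 else 2 * root + 1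
         if a.getD c 0 ≤ a.getD root 0 then root else c)
      else root := by
  unfold pvChooseA
  dsimp only
  split_ifs <;> omega

lemma siftB_eq (a : List Int) (fixed : List Bool) (root size : Nat)
    (acc : List (List Int × List Bool)) :
    siftB a fixed root size acc =
      ((siftA a fixed root size).1, acc ++ (siftA a fixed root size).2) := by
  induction a, root, acc using siftB.induct (fixed := fixed) (size := size) with
  | case1 a root acc child hc c hle =>
    rw [siftB, siftA]
    simp only [child] at hc
    simp only [c, child, dite_eq_ite] at hle
    have h := chooseA_char a root size
    rw [if_pos hc] at h
    simp only at h
    rw [if_pos hle] at h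
    simp only [dif_pos hc, if_pos hle, dif_neg (not_not_intro h)]
    simp
  | case2 a root acc child hc c hle a' ih =>
    rw [siftB, siftA]
    simp only [child] at hc
    simp only [c, child, dite_eq_ite] at hle
    simp only [a', c, child, dite_eq_ite] at ih
    have h := chooseA_char a root size
    rw [if_pos hc] at h
    simp only at h
    rw [if_neg hle] at h
    have hne : pvChooseA a root size ≠ root := by
      rw [h]; split <;> omega
    simp only [dif_pos hc, if_neg hle]
    rw [dif_pos hne]
    simp only [h]
    rw [ih]
    simp [List.append_assoc]
  | case3 a root acc child hc =>
    rw [siftB, siftA]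
    simp only [child] at hc
    have h := chooseA_char a root size
    rw [if_neg hc] at h
    simp only [dif_neg hc, dif_neg (not_not_intro h)]
    simp

lemma buildB_eq (n : Nat) (fixed : List Bool) :
    ∀ (k : Nat) (a : List Int) (acc : List (List Int × List Bool)),
      buildB n fixed k a acc =
        ((List.range k).reverse).foldl (stepBuildA fixed n) (a, acc) := by
  intro k
  induction k with
  | zero => intro a acc; rfl
  | succ k ih =>
    intro a acc
    rw [buildB, List.range_succ, List.reverse_append]
    simp only [List.reverse_singleton, List.singleton_append, List.foldl_cons]
    rw [siftB_eq, ih]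
    rfl

lemma extractB_eq :
    ∀ (e : Nat) (a : List Int) (fixed : List Bool) (acc : List (List Int × List Bool)),
      extractB e a fixed acc =
        ((List.range' 1 e).reverse).foldl stepExtractA (a, fixed, acc) := by
  intro e
  induction e with
  | zero => intro a fixed acc; rfl
  | succ e ih =>
    intro a fixed acc
    rw [extractB, List.range'_concat, List.reverse_append]
    simp only [List.reverse_singleton, List.singleton_append, List.foldl_cons]
    rw [siftB_eq, ih]
    rw [show 1 + 1 * e = e + 1 from by omega]
    simp [stepExtractA, List.append_assoc]

lemma hs_eq (arr : List Int) :
    heapsort_basic_states arr = heapsort_basic_states_alt arr := by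
  simp only [heapsort_basic_states, heapsort_basic_states_alt]
  rw [buildB_eq, extractB_eq]

-- ===== VERDICT (by name: the statement is the Claim_ definition above) =====
theorem heapsort_basic_states_spec : Claim_equal_heapsort_basic_states := by
  intro arr _
  unfold Spec_heapsort_basic_states
  exact (hs_eq arr).symm ▸ rfl
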